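-- pv_equiv track=rewrite | github.com/powergama/powergama | powergama/powergama/costbenefit.py | gameIsSuperadditive
-- ===== SOURCE A (Python) =====
-- import itertools
--
-- def gameIsSuperadditive(values):
--     '''
--     Returns true if the game/valueFunction is superadditive.
--     A characteristic function game G = (N, v) is superadditive
--     if it the sum of two coalitions/subsets gives a larger value than the
--     individual sum:
--     v(C_1 \cup C_2) \geq v(C_1) +  v(C_2) for
--     all C_1, C_2 \subseteq 2^{\Omega} such that C_1 \cap C_2
--     = \emptyset.
--     '''
--     sets = values.keys()
--     for p1, p2 in itertools.combinations(sets, 2):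
--         if not (set(p1) & set(p2)):
--             union = tuple(sorted(set(p1) | set(p2)))
--             if values[union] < values[p1] + values[p2]:
--                 return False
--     return True
-- ===== SOURCE B (Python) =====
-- def gameIsSuperadditive(values):
--     # For each coalition u in the table, try to split it into two smaller
--     # coalitions that are both in the table, instead of filtering all key pairs.
--     canon = {frozenset(k): v for k, v in values.items()}
--     for u, vu in canon.items():
--         for s, vs in canon.items():
--             if s <= u:
--                 t = u - s
--                 if t != s:
--                     vt = canon.get(t)
--                     if vt is not None and vu < vs + vt:
--                         return False
--     return True
-- ===== Notes on version B (the rewrite author's own statement) =====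
-- stated objective: alternative
-- what changed: B indexes the coalitions by their element set once and, for each coalition u in the table, looks up each candidate part s ⊆ u and its complement u−s directly in that index, instead of filtering all key pairs for disjointness and reconstructing the sorted union key.
-- outside the precondition, e.g. on gameIsSuperadditive({(1,): 1, (2,): 1, (1, 2): 2, (2, 1): 0}): A returns True, B returns False
import Mathlib
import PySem

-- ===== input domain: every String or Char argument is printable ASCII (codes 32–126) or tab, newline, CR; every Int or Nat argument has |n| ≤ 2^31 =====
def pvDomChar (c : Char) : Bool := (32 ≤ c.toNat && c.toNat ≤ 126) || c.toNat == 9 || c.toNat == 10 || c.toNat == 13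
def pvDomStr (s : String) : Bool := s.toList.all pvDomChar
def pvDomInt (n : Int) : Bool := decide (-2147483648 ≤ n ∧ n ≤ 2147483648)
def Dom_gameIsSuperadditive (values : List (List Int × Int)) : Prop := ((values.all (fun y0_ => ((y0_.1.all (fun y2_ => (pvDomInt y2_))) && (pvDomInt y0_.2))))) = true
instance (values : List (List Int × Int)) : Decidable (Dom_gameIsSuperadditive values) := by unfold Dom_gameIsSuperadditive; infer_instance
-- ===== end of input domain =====

-- B replaces A's scan over all key pairs (filtering for disjointness and rebuilding the
-- sorted union key) by a per-coalition split: an element-set-keyed index is built once and,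
-- for each coalition u and candidate part s ⊆ u, the complement u - s is looked up directly
-- (objective: alternative decomposition, same worst-case cost).

-- ===== PORT A =====
-- the body of A's loop over itertools.combinations(keys, 2); 'values[union]' raises KeyError
-- when the union key is missing, so its port is a get?-match: on every input where the
-- Python returns, each union lookup a returning run evaluates succeeds, and pairs after an
-- early 'return False' cannot change the conjunction, so the none-branch never changes the
-- result there (inputs on which A raises lie outside Pre_ and are unconstrained).
def pvPairOk (d : PySem.Dict (List Int) Int) (c : List (List Int)) : Bool :=
  match c with
  | [p1, p2] =>
    if PySem.Set.inter (PySem.Set.ofList p1) (PySem.Set.ofList p2) = ([] : List Int) then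
      match d.get? (PySem.List.sorted (PySem.Set.union (PySem.Set.ofList p1) (PySem.Set.ofList p2)) (fun x => x) false) with
      | some vu => !decide (vu < d.getD p1 0 + d.getD p2 0)
      | none => true
    else true
  | _ => true

def gameIsSuperadditive (values : List (List Int × Int)) : Bool :=
  let d := PySem.Dict.ofList values
  (PySem.List.combinations d.keys 2).all (pvPairOk d)

-- ===== PORT B =====
-- frozenset(k) is modelled exactly by its canonical form: the strictly increasing list of
-- k's distinct elements (two frozensets are equal iff their canonical lists are equal)
def pvFz (k : List Int) : List Int :=
  PySem.List.sorted (PySem.Set.ofList k) (fun x => x) false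

-- the body of B's inner loop: try the split (s, u - s) of coalition u
def pvSplitOk (canon : PySem.Dict (List Int) Int) (u s : List Int × Int) : Bool :=
  if PySem.Set.issubset s.1 u.1 then
    if PySem.Set.diff u.1 s.1 = s.1 then true
    else
      match canon.get? (PySem.Set.diff u.1 s.1) with
      | some vt => !decide (u.2 < s.2 + vt)
      | none => true
  else true

def gameIsSuperadditive_alt (values : List (List Int × Int)) : Bool :=
  let d := PySem.Dict.ofList values
  let canon := PySem.Dict.ofList (d.items.map (fun p => (pvFz p.1, p.2)))
  canon.items.all (fun u => canon.items.all (pvSplitOk canon u))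

-- ===== PRECONDITION & SPEC =====
-- vocabulary for Pre_: tuple(sorted(set(k1) | set(k2))), set-disjointness of two keys, and
-- "the pair of keys at positions i < j is violating (union key present, its value below the
-- parts' sum) / bad (disjoint but union key missing, where values[union] raises KeyError)"
def pvUnion (k1 k2 : List Int) : List Int :=
  PySem.List.sorted (PySem.Set.union (PySem.Set.ofList k1) (PySem.Set.ofList k2)) (fun x => x) false

def pvDisj (k1 k2 : List Int) : Bool :=
  decide (PySem.Set.inter (PySem.Set.ofList k1) (PySem.Set.ofList k2) = ([] : List Int))

def pvViol (values : List (List Int × Int)) (i j : Nat) : Bool :=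
  pvDisj ((PySem.Dict.ofList values).keys.getD i []) ((PySem.Dict.ofList values).keys.getD j []) &&
  decide (pvUnion ((PySem.Dict.ofList values).keys.getD i []) ((PySem.Dict.ofList values).keys.getD j []) ∈ (PySem.Dict.ofList values).keys) &&
  decide ((PySem.Dict.ofList values).getD (pvUnion ((PySem.Dict.ofList values).keys.getD i []) ((PySem.Dict.ofList values).keys.getD j [])) 0 <
    (PySem.Dict.ofList values).getD ((PySem.Dict.ofList values).keys.getD i []) 0 +
    (PySem.Dict.ofList values).getD ((PySem.Dict.ofList values).keys.getD j []) 0)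

def pvBad (values : List (List Int × Int)) (i j : Nat) : Bool :=
  pvDisj ((PySem.Dict.ofList values).keys.getD i []) ((PySem.Dict.ofList values).keys.getD j []) &&
  !decide (pvUnion ((PySem.Dict.ofList values).keys.getD i []) ((PySem.Dict.ofList values).keys.getD j []) ∈ (PySem.Dict.ofList values).keys)

-- Pre_ admits (1) every dict without a set-disjoint pair of distinct keys (both programs then
-- scan nothing and return True); and, among dicts whose distinct keys never spell the same
-- element set twice, (2) dicts where every disjoint pair's union key is present (A completes
-- its scan or returns False), and (3) dicts where some violating pair precedes, in A's
-- itertools.combinations order, every bad pair (A returns False before reaching a KeyError).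
-- Excluded remain exactly the inputs where A raises KeyError, and dicts with two distinct
-- keys spelling the same element set — which twin A's sorted-union lookup hits is an
-- accident of key spelling that an element-set index cannot reproduce.
def Pre_gameIsSuperadditive (values : List (List Int × Int)) : Prop :=
  (∀ k1 ∈ (PySem.Dict.ofList values).keys, ∀ k2 ∈ (PySem.Dict.ofList values).keys,
      k1 ≠ k2 → pvDisj k1 k2 = false) ∨
  ((∀ k1 ∈ (PySem.Dict.ofList values).keys, ∀ k2 ∈ (PySem.Dict.ofList values).keys,
      k1 ≠ k2 → pvFz k1 ≠ pvFz k2) ∧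
   (∀ k1 ∈ (PySem.Dict.ofList values).keys, ∀ k2 ∈ (PySem.Dict.ofList values).keys,
      k1 ≠ k2 → pvDisj k1 k2 = true → pvUnion k1 k2 ∈ (PySem.Dict.ofList values).keys)) ∨
  ((∀ k1 ∈ (PySem.Dict.ofList values).keys, ∀ k2 ∈ (PySem.Dict.ofList values).keys,
      k1 ≠ k2 → pvFz k1 ≠ pvFz k2) ∧
   ∃ j < (PySem.Dict.ofList values).keys.length, ∃ i < j, pvViol values i j = true ∧
     ∀ j' < (PySem.Dict.ofList values).keys.length, ∀ i' < j', pvBad values i' j' = true →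
       (i < i' ∨ (i = i' ∧ j < j')))

instance (values : List (List Int × Int)) : Decidable (Pre_gameIsSuperadditive values) := by
  unfold Pre_gameIsSuperadditive; infer_instance

def pvWitness_gameIsSuperadditive : (List (List Int × Int)) := [([1], 1), ([2], 1), ([1, 2], 3)]

def Spec_gameIsSuperadditive (values : List (List Int × Int)) (out : Bool) : Prop := out = gameIsSuperadditive_alt values
instance (values : List (List Int × Int)) (out : Bool) : Decidable (Spec_gameIsSuperadditive values out) := by unfold Spec_gameIsSuperadditive; infer_instance

-- ===== CLAIM (what is proved, stated in full; the proofs are below) =====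
def Claim_equal_gameIsSuperadditive : Prop := ∀ (values : List (List Int × Int)), Dom_gameIsSuperadditive values → Pre_gameIsSuperadditive values → Spec_gameIsSuperadditive values (gameIsSuperadditive values)

-- ===== LEMMAS AND PROOFS =====

theorem mem_pvFz (x : Int) (k : List Int) : x ∈ pvFz k ↔ x ∈ k := by
  simp [pvFz, PySem.List.mem_sorted, PySem.Set.mem_ofList]

theorem pairwise_pvFz (k : List Int) : (pvFz k).Pairwise (· < ·) :=
  PySem.List.sorted_ofList_pairwise_lt k

theorem eq_of_pairwise_lt_ext (xs ys : List Int)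
    (hx : xs.Pairwise (· < ·)) (hy : ys.Pairwise (· < ·))
    (h : ∀ x, x ∈ xs ↔ x ∈ ys) : xs = ys := by
  have ndx : xs.Nodup := hx.imp (fun h => ne_of_lt h)
  have ndy : ys.Nodup := hy.imp (fun h => ne_of_lt h)
  have hp : ys.Perm xs := (List.perm_ext_iff_of_nodup ndy ndx).mpr (fun a => (h a).symm)
  have h1 : PySem.List.sorted xs (fun x => x) false = ys :=
    PySem.List.sorted_eq_of_perm_of_pairwise_lt xs ys (fun x => x) hp hy
  have h2 : PySem.List.sorted xs (fun x => x) false = xs :=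
    PySem.List.sorted_eq_of_perm_of_pairwise_lt xs xs (fun x => x) (List.Perm.refl xs) hx
  rw [h2] at h1; exact h1

theorem pvFz_idem (k : List Int) : pvFz (pvFz k) = pvFz k :=
  eq_of_pairwise_lt_ext _ _ (pairwise_pvFz _) (pairwise_pvFz _) (by simp [mem_pvFz])

theorem sortedUnion_eq_pvFz_append (a b : List Int) :
    PySem.List.sorted (PySem.Set.union (PySem.Set.ofList a) (PySem.Set.ofList b)) (fun x => x) false
      = pvFz (a ++ b) := by
  apply PySem.List.sorted_eq_of_perm_of_pairwise_lt
  · refine (List.perm_ext_iff_of_nodup ?_ ?_).mpr ?_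
    · exact (pairwise_pvFz _).imp (fun h => ne_of_lt h)
    · exact PySem.Set.nodup_union _ _ (PySem.Set.nodup_ofList a)
    · intro x
      simp [mem_pvFz, PySem.Set.mem_union, PySem.Set.mem_ofList]
  · exact pairwise_pvFz _

theorem inter_eq_nil_iff (a b : List Int) :
    PySem.Set.inter (PySem.Set.ofList a) (PySem.Set.ofList b) = ([] : List Int) ↔
      ∀ x, ¬(x ∈ a ∧ x ∈ b) := by
  rw [List.eq_nil_iff_forall_not_mem]
  constructor
  · intro h x hx
    exact h x (by rw [PySem.Set.mem_inter]; simp [PySem.Set.mem_ofList, hx.1, hx.2])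
  · intro h x hx
    rw [PySem.Set.mem_inter] at hx
    simp [PySem.Set.mem_ofList] at hx
    exact h x hx

theorem pair_sub_of_mem {α : Type} {l : List α} {a b : α}
    (ha : a ∈ l) (hb : b ∈ l) (hne : a ≠ b) :
    [a, b].Sublist l ∨ [b, a].Sublist l := by
  induction l with
  | nil => simp at ha
  | cons x xs ih =>
    by_cases hax : a = x
    · subst hax
      have hbx : b ∈ xs := (List.mem_cons.mp hb).resolve_left (fun h => hne h.symm)
      exact Or.inl (List.Sublist.cons₂ a (List.singleton_sublist.mpr hbx))
    · by_cases hbxx : b = x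
      · subst hbxx
        have hax' : a ∈ xs := (List.mem_cons.mp ha).resolve_left hax
        exact Or.inr (List.Sublist.cons₂ b (List.singleton_sublist.mpr hax'))
      · have ha' : a ∈ xs := (List.mem_cons.mp ha).resolve_left hax
        have hb' : b ∈ xs := (List.mem_cons.mp hb).resolve_left hbxx
        exact (ih ha' hb').imp (List.Sublist.cons x) (List.Sublist.cons x)

theorem pvPairOk_pair (d : PySem.Dict (List Int) Int) (a b : List Int) :
    pvPairOk d [a, b] =
      if PySem.Set.inter (PySem.Set.ofList a) (PySem.Set.ofList b) = ([] : List Int) then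
        match d.get? (PySem.List.sorted (PySem.Set.union (PySem.Set.ofList a) (PySem.Set.ofList b)) (fun x => x) false) with
        | some vu => !decide (vu < d.getD a 0 + d.getD b 0)
        | none => true
      else true := rfl

theorem pvPairOk_swap (d : PySem.Dict (List Int) Int) (a b : List Int) :
    pvPairOk d [a, b] = pvPairOk d [b, a] := by
  rw [pvPairOk_pair, pvPairOk_pair]
  by_cases h : PySem.Set.inter (PySem.Set.ofList a) (PySem.Set.ofList b) = ([] : List Int)
  · have h' : PySem.Set.inter (PySem.Set.ofList b) (PySem.Set.ofList a) = ([] : List Int) := by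
      rw [inter_eq_nil_iff] at h ⊢
      intro x hx; exact h x ⟨hx.2, hx.1⟩
    rw [if_pos h, if_pos h']
    have hu : PySem.List.sorted (PySem.Set.union (PySem.Set.ofList a) (PySem.Set.ofList b)) (fun x => x) false
        = PySem.List.sorted (PySem.Set.union (PySem.Set.ofList b) (PySem.Set.ofList a)) (fun x => x) false := by
      rw [sortedUnion_eq_pvFz_append, sortedUnion_eq_pvFz_append]
      exact eq_of_pairwise_lt_ext _ _ (pairwise_pvFz _) (pairwise_pvFz _)
        (by intro x; simp [mem_pvFz]; tauto)
    rw [hu, Int.add_comm (d.getD a 0) (d.getD b 0)]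
  · have h' : ¬ PySem.Set.inter (PySem.Set.ofList b) (PySem.Set.ofList a) = ([] : List Int) := by
      rw [inter_eq_nil_iff] at h ⊢
      intro hc; apply h; intro x hx; exact hc x ⟨hx.2, hx.1⟩
    rw [if_neg h, if_neg h']

theorem items_ofList_of_nodup {κ ν : Type} [BEq κ] [LawfulBEq κ] (l : List (κ × ν))
    (h : (l.map Prod.fst).Nodup) : (PySem.Dict.ofList l).items = l := by
  show (List.foldl (fun acc p => acc.insert p.1 p.2) PySem.Dict.empty l).items = l
  have := PySem.Dict.items_foldl_insert_fresh l Prod.fst Prod.snd PySem.Dict.empty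
    (fun a _ => PySem.Dict.contains_empty _) h
  simpa using this

theorem mem_keys_iff {κ ν : Type} [BEq κ] (d : PySem.Dict κ ν) (k : κ) :
    k ∈ d.keys ↔ ∃ v, (k, v) ∈ d.items := by
  simp only [PySem.Dict.keys, List.mem_map]
  constructor
  · rintro ⟨p, hp, rfl⟩
    exact ⟨p.2, by rwa [Prod.mk.eta]⟩
  · rintro ⟨v, hv⟩
    exact ⟨(k, v), hv, rfl⟩


theorem diff_pairwise (u s : List Int) (h : u.Pairwise (· < ·)) :
    (PySem.Set.diff u s).Pairwise (· < ·) :=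
  List.Pairwise.sublist List.filter_sublist h

theorem A_char (d : PySem.Dict (List Int) Int) (hnd : d.keys.Nodup) :
    ((PySem.List.combinations d.keys 2).all (pvPairOk d) = true) ↔
      ∀ a b, a ∈ d.keys → b ∈ d.keys → a ≠ b → pvPairOk d [a, b] = true := by
  rw [List.all_eq_true]
  constructor
  · intro h a b ha hb hne
    rcases pair_sub_of_mem ha hb hne with hs | hs
    · exact h _ ((PySem.List.mem_combinations_iff _ _ _).mpr ⟨hs, rfl⟩)
    · rw [pvPairOk_swap]
      exact h _ ((PySem.List.mem_combinations_iff _ _ _).mpr ⟨hs, rfl⟩)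
  · intro h c hc
    rcases (PySem.List.mem_combinations_iff _ _ _).mp hc with ⟨hs, hl⟩
    rcases List.length_eq_two.mp hl with ⟨a, b, rfl⟩
    have hnd2 : ([a, b] : List (List Int)).Nodup := hs.nodup hnd
    have hne : a ≠ b := by simp at hnd2; exact hnd2
    exact h a b (hs.subset (by simp)) (hs.subset (by simp)) hne

theorem canon_keys_mem (cl : List (List Int × Int)) (k : List Int)
    (h : k ∈ (PySem.Dict.ofList cl).keys) : k ∈ cl.map Prod.fst := by
  have hk : (PySem.Dict.ofList cl).keys = PySem.Set.update (PySem.Dict.empty : PySem.Dict (List Int) Int).keys (cl.map Prod.fst) :=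
    PySem.Dict.keys_foldl_insert_key cl Prod.fst (fun d p => p.2) (PySem.Dict.empty : PySem.Dict (List Int) Int)
  rw [hk] at h
  rw [PySem.Set.mem_update] at h
  rcases h with h | h
  · simp [PySem.Dict.keys_empty] at h
  · exact h

-- with no set-disjoint pair of distinct keys, both programs scan nothing and return True
theorem main_eq_of_nodisj (values : List (List Int × Int))
    (hnd' : ∀ k1 ∈ (PySem.Dict.ofList values).keys, ∀ k2 ∈ (PySem.Dict.ofList values).keys,
      k1 ≠ k2 → PySem.Set.inter (PySem.Set.ofList k1) (PySem.Set.ofList k2) ≠ ([] : List Int)) :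
    gameIsSuperadditive values = gameIsSuperadditive_alt values := by
  have hnd : (PySem.Dict.ofList values).keys.Nodup := PySem.Dict.nodup_keys_ofList values
  set d := PySem.Dict.ofList values with hd
  set cl := d.items.map (fun p => (pvFz p.1, p.2)) with hcl
  set canon := PySem.Dict.ofList cl with hcanon
  have hkey : ∀ k ∈ canon.keys, ∃ ky ∈ d.keys, pvFz ky = k := by
    intro k hk
    have := canon_keys_mem cl k hk
    rw [hcl, List.map_map] at this
    rcases List.mem_map.mp this with ⟨p, hp, hpk⟩
    exact ⟨p.1, (mem_keys_iff d p.1).mpr ⟨p.2, by rwa [Prod.mk.eta]⟩, hpk⟩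
  have hA : gameIsSuperadditive values = true := by
    show (PySem.List.combinations d.keys 2).all (pvPairOk d) = true
    rw [A_char d hnd]
    intro a b ha hb hne
    rw [pvPairOk_pair, if_neg (hnd' a ha b hb hne)]
  have hB : gameIsSuperadditive_alt values = true := by
    show canon.items.all (fun u => canon.items.all (pvSplitOk canon u)) = true
    simp only [List.all_eq_true]
    intro u hu s hs
    unfold pvSplitOk
    by_cases hsub : PySem.Set.issubset s.1 u.1 = true
    swap
    · simp only [hsub]; rfl
    rw [if_pos hsub]
    by_cases hts : PySem.Set.diff u.1 s.1 = s.1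
    · rw [if_pos hts]
    rw [if_neg hts]
    cases hgt : canon.get? (PySem.Set.diff u.1 s.1) with
    | none => rfl
    | some vt =>
      exfalso
      -- s.1 and the complement are element sets of two distinct, set-disjoint keys
      have hsk : s.1 ∈ canon.keys := by
        have := PySem.Dict.mem_items_of_get?_eq_some canon (PySem.Dict.get?_of_mem_items canon hs (PySem.Dict.nodup_keys_ofList cl))
        exact (mem_keys_iff canon s.1).mpr ⟨s.2, this⟩
      have htk : PySem.Set.diff u.1 s.1 ∈ canon.keys := by
        exact (mem_keys_iff canon _).mpr ⟨vt, PySem.Dict.mem_items_of_get?_eq_some canon hgt⟩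
      rcases hkey _ hsk with ⟨ks₀, hks₀, hfs⟩
      rcases hkey _ htk with ⟨kt₀, hkt₀, hft⟩
      have hmemS : ∀ x, x ∈ ks₀ ↔ x ∈ s.1 := by
        intro x; rw [← hfs, mem_pvFz]
      have hmemT : ∀ x, x ∈ kt₀ ↔ x ∈ PySem.Set.diff u.1 s.1 := by
        intro x; rw [← hft, mem_pvFz]
      have hne : ks₀ ≠ kt₀ := by
        rintro rfl
        exact hts ((hft.symm).trans hfs)
      apply hnd' ks₀ hks₀ kt₀ hkt₀ hne
      rw [inter_eq_nil_iff]
      rintro x ⟨h1, h2⟩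
      have hx1 : x ∈ s.1 := (hmemS x).mp h1
      have hx2 : x ∈ PySem.Set.diff u.1 s.1 := (hmemT x).mp h2
      rw [PySem.Set.mem_diff] at hx2
      exact hx2.2 hx1
  rw [hA, hB]

theorem main_eq_of_pre12 (values : List (List Int × Int))
    (pre1 : ∀ k1 ∈ (PySem.Dict.ofList values).keys, ∀ k2 ∈ (PySem.Dict.ofList values).keys,
      k1 ≠ k2 → pvFz k1 ≠ pvFz k2)
    (pre2 : ∀ k1 ∈ (PySem.Dict.ofList values).keys, ∀ k2 ∈ (PySem.Dict.ofList values).keys,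
      k1 ≠ k2 →
      PySem.Set.inter (PySem.Set.ofList k1) (PySem.Set.ofList k2) = ([] : List Int) →
      PySem.List.sorted (PySem.Set.union (PySem.Set.ofList k1) (PySem.Set.ofList k2)) (fun x => x) false
        ∈ (PySem.Dict.ofList values).keys) :
    gameIsSuperadditive values = gameIsSuperadditive_alt values := by
  have hnd : (PySem.Dict.ofList values).keys.Nodup := PySem.Dict.nodup_keys_ofList values
  set d := PySem.Dict.ofList values with hd
  set cl := d.items.map (fun p => (pvFz p.1, p.2)) with hcl
  set canon := PySem.Dict.ofList cl with hcanon
  have hclnd : (cl.map Prod.fst).Nodup := by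
    rw [hcl, List.map_map]
    have h1 : (Prod.fst ∘ fun p : List Int × Int => (pvFz p.1, p.2)) = (fun p => pvFz p.1) := rfl
    rw [h1]
    have h2 : (fun p : List Int × Int => pvFz p.1) = pvFz ∘ Prod.fst := rfl
    rw [h2, ← List.map_map]
    apply List.Nodup.map_on _ hnd
    · intro x hx y hy hxy
      by_contra hne
      exact pre1 x hx y hy hne hxy
  have hitems : canon.items = cl := items_ofList_of_nodup cl hclnd
  have hcnd : canon.keys.Nodup := PySem.Dict.nodup_keys_ofList cl
  have hfix : ∀ k ∈ d.keys, pvFz k ∈ d.keys → pvFz k = k := by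
    intro k hk hm
    by_contra hne
    exact pre1 (pvFz k) hm k hk hne (pvFz_idem k)
  rw [Bool.eq_iff_iff]
  show ((PySem.List.combinations d.keys 2).all (pvPairOk d) = true) ↔
    (canon.items.all (fun u => canon.items.all (pvSplitOk canon u)) = true)
  rw [A_char d hnd]
  simp only [List.all_eq_true]
  constructor
  · -- A passes every pair → every split passes
    intro hA u hu s hs
    rw [hitems, hcl] at hu hs
    rcases List.mem_map.mp hu with ⟨⟨ka, vu⟩, hka, rfl⟩
    rcases List.mem_map.mp hs with ⟨⟨kb, vs⟩, hkb, rfl⟩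
    show pvSplitOk canon (pvFz ka, vu) (pvFz kb, vs) = true
    unfold pvSplitOk
    by_cases hsub : PySem.Set.issubset (pvFz kb) (pvFz ka) = true
    swap
    · simp only [hsub]; rfl
    rw [if_pos hsub]
    by_cases hts : PySem.Set.diff (pvFz ka) (pvFz kb) = pvFz kb
    · rw [if_pos hts]
    rw [if_neg hts]
    cases hget : canon.get? (PySem.Set.diff (pvFz ka) (pvFz kb)) with
    | none => rfl
    | some vt =>
      have hmem : (PySem.Set.diff (pvFz ka) (pvFz kb), vt) ∈ canon.items :=
        PySem.Dict.mem_items_of_get?_eq_some canon hget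
      rw [hitems, hcl] at hmem
      rcases List.mem_map.mp hmem with ⟨⟨kc, vt'⟩, hkc, heq⟩
      have ht : PySem.Set.diff (pvFz ka) (pvFz kb) = pvFz kc := (congrArg Prod.fst heq).symm
      have hvt : vt' = vt := congrArg Prod.snd heq
      rw [hvt] at hkc
      have hka' : ka ∈ d.keys := (mem_keys_iff d ka).mpr ⟨vu, hka⟩
      have hkb' : kb ∈ d.keys := (mem_keys_iff d kb).mpr ⟨vs, hkb⟩
      have hkc' : kc ∈ d.keys := (mem_keys_iff d kc).mpr ⟨vt, hkc⟩
      have hsub' : ∀ x, x ∈ kb → x ∈ ka := by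
        intro x hx
        have := (PySem.Set.issubset_iff _ _).mp hsub x ((mem_pvFz x kb).mpr hx)
        exact (mem_pvFz x ka).mp this
      have htm : ∀ x, x ∈ kc ↔ (x ∈ ka ∧ x ∉ kb) := by
        intro x
        rw [← mem_pvFz x kc, ← ht, PySem.Set.mem_diff, mem_pvFz, mem_pvFz]
      have hne : kb ≠ kc := by
        rintro rfl
        exact hts (by rw [ht])
      have hdisj : PySem.Set.inter (PySem.Set.ofList kb) (PySem.Set.ofList kc) = ([] : List Int) := by
        rw [inter_eq_nil_iff]
        rintro x ⟨h1, h2⟩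
        exact ((htm x).mp h2).2 h1
      have hun : PySem.List.sorted (PySem.Set.union (PySem.Set.ofList kb) (PySem.Set.ofList kc)) (fun x => x) false
          = pvFz ka := by
        rw [sortedUnion_eq_pvFz_append]
        apply eq_of_pairwise_lt_ext _ _ (pairwise_pvFz _) (pairwise_pvFz _)
        intro x
        rw [mem_pvFz, mem_pvFz, List.mem_append]
        constructor
        · rintro (h | h)
          · exact hsub' x h
          · exact ((htm x).mp h).1
        · intro h
          by_cases hxb : x ∈ kb
          · exact Or.inl hxb
          · exact Or.inr ((htm x).mpr ⟨h, hxb⟩)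
      have hwk : pvFz ka ∈ d.keys := by
        have := pre2 kb hkb' kc hkc' hne hdisj
        rwa [hun] at this
      have hkafix : pvFz ka = ka := hfix ka hka' hwk
      have hgu : d.get? (pvFz ka) = some vu := by
        rw [hkafix]; exact PySem.Dict.get?_of_mem_items d hka hnd
      have hvb : d.getD kb 0 = vs := PySem.Dict.getD_of_mem_items d hkb hnd 0
      have hvc : d.getD kc 0 = vt := PySem.Dict.getD_of_mem_items d hkc hnd 0
      have hok := hA kb kc hkb' hkc' hne
      rw [pvPairOk_pair, if_pos hdisj, hun, hgu, hvb, hvc] at hok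
      exact hok
  · -- every split passes → A passes every pair
    intro hB a b ha hb hne
    rw [pvPairOk_pair]
    by_cases hdisj : PySem.Set.inter (PySem.Set.ofList a) (PySem.Set.ofList b) = ([] : List Int)
    swap
    · rw [if_neg hdisj]
    rw [if_pos hdisj]
    have hdisj' : ∀ x, x ∈ b → x ∉ a := by
      intro x hxb hxa
      exact (inter_eq_nil_iff a b).mp hdisj x ⟨hxa, hxb⟩
    have hw : PySem.List.sorted (PySem.Set.union (PySem.Set.ofList a) (PySem.Set.ofList b)) (fun x => x) false
        ∈ d.keys := pre2 a ha b hb hne hdisj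
    set w := PySem.List.sorted (PySem.Set.union (PySem.Set.ofList a) (PySem.Set.ofList b)) (fun x => x) false with hwdef
    have hwapp : w = pvFz (a ++ b) := sortedUnion_eq_pvFz_append a b
    have hwmem : ∀ x, x ∈ w ↔ x ∈ a ∨ x ∈ b := by
      intro x; rw [hwapp, mem_pvFz, List.mem_append]
    rcases (mem_keys_iff d w).mp hw with ⟨vw, hvw⟩
    rcases (mem_keys_iff d a).mp ha with ⟨va, hva⟩
    rcases (mem_keys_iff d b).mp hb with ⟨vb, hvb⟩
    have hgw : d.get? w = some vw := PySem.Dict.get?_of_mem_items d hvw hnd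
    rw [hgw]
    have hu : (pvFz w, vw) ∈ canon.items := by
      rw [hitems, hcl]; exact List.mem_map.mpr ⟨(w, vw), hvw, rfl⟩
    have hs : (pvFz a, va) ∈ canon.items := by
      rw [hitems, hcl]; exact List.mem_map.mpr ⟨(a, va), hva, rfl⟩
    have hok := hB (pvFz w, vw) hu (pvFz a, va) hs
    unfold pvSplitOk at hok
    have hsub : PySem.Set.issubset (pvFz a) (pvFz w) = true := by
      rw [PySem.Set.issubset_iff]
      intro x hx
      rw [mem_pvFz] at hx
      rw [mem_pvFz, hwmem]
      exact Or.inl hx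
    rw [if_pos hsub] at hok
    have hdiffb : PySem.Set.diff (pvFz w) (pvFz a) = pvFz b := by
      apply eq_of_pairwise_lt_ext _ _ (diff_pairwise _ _ (pairwise_pvFz _)) (pairwise_pvFz _)
      intro x
      rw [PySem.Set.mem_diff, mem_pvFz, mem_pvFz, mem_pvFz, hwmem]
      constructor
      · rintro ⟨h1 | h1, h2⟩
        · exact absurd h1 h2
        · exact h1
      · intro h
        exact ⟨Or.inr h, hdisj' x h⟩
    have htne : ¬ (PySem.Set.diff (pvFz w) (pvFz a) = pvFz a) := by
      rw [hdiffb]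
      intro hc
      exact pre1 b hb a ha (Ne.symm hne) hc
    rw [if_neg htne, hdiffb] at hok
    have hgb : canon.get? (pvFz b) = some vb := by
      apply PySem.Dict.get?_of_mem_items canon _ hcnd
      rw [hitems, hcl]; exact List.mem_map.mpr ⟨(b, vb), hvb, rfl⟩
    rw [hgb] at hok
    have hva' : d.getD a 0 = va := PySem.Dict.getD_of_mem_items d hva hnd 0
    have hvb' : d.getD b 0 = vb := PySem.Dict.getD_of_mem_items d hvb hnd 0
    rw [hva', hvb']
    exact hok



theorem pair_sublist {α : Type} (l : List α) (i j : Nat) (hij : i < j) (hj : j < l.length) :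
    [l[i]'(by omega), l[j]'hj].Sublist l := by
  induction l generalizing i j with
  | nil => simp at hj
  | cons a t ih =>
    cases i with
    | zero =>
      cases j with
      | zero => omega
      | succ j' =>
        simp only [List.getElem_cons_zero, List.getElem_cons_succ]
        exact List.Sublist.cons₂ a (List.singleton_sublist.mpr (List.getElem_mem _))
    | succ i' =>
      cases j with
      | zero => omega
      | succ j' =>
        have hj' : j' < t.length := by simpa [List.length_cons] using hj
        simp only [List.getElem_cons_succ]
        exact (ih i' j' (by omega) hj').cons a

theorem get?_eq_some_getD {κ ν : Type} [BEq κ] [LawfulBEq κ] (d : PySem.Dict κ ν) (k : κ)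
    (hk : k ∈ d.keys) (hnd : d.keys.Nodup) (d0 : ν) : d.get? k = some (d.getD k d0) := by
  rcases (mem_keys_iff d k).mp hk with ⟨v, hv⟩
  rw [PySem.Dict.get?_of_mem_items d hv hnd, PySem.Dict.getD_of_mem_items d hv hnd d0]

-- a violating pair whose union key is present makes both programs answer False
theorem main_eq_of_viol (values : List (List Int × Int))
    (pre1 : ∀ k1 ∈ (PySem.Dict.ofList values).keys, ∀ k2 ∈ (PySem.Dict.ofList values).keys,
      k1 ≠ k2 → pvFz k1 ≠ pvFz k2)
    (i j : Nat) (hj : j < (PySem.Dict.ofList values).keys.length) (hij : i < j)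
    (hviol : pvViol values i j = true) :
    gameIsSuperadditive values = gameIsSuperadditive_alt values := by
  have hnd : (PySem.Dict.ofList values).keys.Nodup := PySem.Dict.nodup_keys_ofList values
  set d := PySem.Dict.ofList values with hd
  set cl := d.items.map (fun p => (pvFz p.1, p.2)) with hcl
  set canon := PySem.Dict.ofList cl with hcanon
  have hclnd : (cl.map Prod.fst).Nodup := by
    rw [hcl, List.map_map]
    have h1 : (Prod.fst ∘ fun p : List Int × Int => (pvFz p.1, p.2)) = (fun p => pvFz p.1) := rfl
    rw [h1]
    have h2 : (fun p : List Int × Int => pvFz p.1) = pvFz ∘ Prod.fst := rfl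
    rw [h2, ← List.map_map]
    apply List.Nodup.map_on _ hnd
    · intro x hx y hy hxy
      by_contra hne
      exact pre1 x hx y hy hne hxy
  have hitems : canon.items = cl := items_ofList_of_nodup cl hclnd
  have hcnd : canon.keys.Nodup := PySem.Dict.nodup_keys_ofList cl
  have hi : i < d.keys.length := by omega
  simp only [pvViol, pvDisj, pvUnion, Bool.and_eq_true, decide_eq_true_eq] at hviol
  rw [← hd] at hviol
  obtain ⟨⟨hdisj, hwk⟩, hlt⟩ := hviol
  set p1 := d.keys.getD i [] with hp1
  set p2 := d.keys.getD j [] with hp2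
  have hp1e : p1 = d.keys[i]'hi := List.getD_eq_getElem _ _ hi
  have hp2e : p2 = d.keys[j]'hj := List.getD_eq_getElem _ _ hj
  have ha : p1 ∈ d.keys := by rw [hp1e]; exact List.getElem_mem _
  have hb : p2 ∈ d.keys := by rw [hp2e]; exact List.getElem_mem _
  have hne : p1 ≠ p2 := by
    rw [hp1e, hp2e]
    intro he
    exact absurd ((List.Nodup.getElem_inj_iff hnd).mp he) (by omega)
  have hsl : [p1, p2].Sublist d.keys := by
    rw [hp1e, hp2e]; exact pair_sublist d.keys i j hij hj
  set w := PySem.List.sorted (PySem.Set.union (PySem.Set.ofList p1) (PySem.Set.ofList p2)) (fun x => x) false with hwdef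
  have hgw : d.get? w = some (d.getD w 0) := get?_eq_some_getD d w hwk hnd 0
  have hdisj' : ∀ x, x ∈ p2 → x ∉ p1 := by
    intro x hxb hxa
    exact (inter_eq_nil_iff p1 p2).mp hdisj x ⟨hxa, hxb⟩
  have hwapp : w = pvFz (p1 ++ p2) := sortedUnion_eq_pvFz_append p1 p2
  have hwmem : ∀ x, x ∈ w ↔ x ∈ p1 ∨ x ∈ p2 := by
    intro x; rw [hwapp, mem_pvFz, List.mem_append]
  have hA : gameIsSuperadditive values = false := by
    show (PySem.List.combinations d.keys 2).all (pvPairOk d) = false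
    rw [List.all_eq_false]
    refine ⟨[p1, p2], (PySem.List.mem_combinations_iff _ _ _).mpr ⟨hsl, rfl⟩, ?_⟩
    rw [pvPairOk_pair, if_pos hdisj, hgw]
    simp only [Bool.not_eq_true']
    simpa using hlt
  have hB : gameIsSuperadditive_alt values = false := by
    show canon.items.all (fun u => canon.items.all (pvSplitOk canon u)) = false
    rcases (mem_keys_iff d w).mp hwk with ⟨vw, hvw⟩
    rcases (mem_keys_iff d p1).mp ha with ⟨v1, hv1⟩
    rcases (mem_keys_iff d p2).mp hb with ⟨v2, hv2⟩
    have hvw' : d.getD w 0 = vw := PySem.Dict.getD_of_mem_items d hvw hnd 0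
    have hv1' : d.getD p1 0 = v1 := PySem.Dict.getD_of_mem_items d hv1 hnd 0
    have hv2' : d.getD p2 0 = v2 := PySem.Dict.getD_of_mem_items d hv2 hnd 0
    rw [List.all_eq_false]
    refine ⟨(pvFz w, vw), by rw [hitems, hcl]; exact List.mem_map.mpr ⟨(w, vw), hvw, rfl⟩, ?_⟩
    simp only [Bool.not_eq_true]
    rw [List.all_eq_false]
    refine ⟨(pvFz p1, v1), by rw [hitems, hcl]; exact List.mem_map.mpr ⟨(p1, v1), hv1, rfl⟩, ?_⟩
    simp only [Bool.not_eq_true]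
    unfold pvSplitOk
    have hsub : PySem.Set.issubset (pvFz p1) (pvFz w) = true := by
      rw [PySem.Set.issubset_iff]
      intro x hx
      rw [mem_pvFz] at hx
      rw [mem_pvFz, hwmem]
      exact Or.inl hx
    rw [if_pos hsub]
    have hdiffb : PySem.Set.diff (pvFz w) (pvFz p1) = pvFz p2 := by
      apply eq_of_pairwise_lt_ext _ _ (diff_pairwise _ _ (pairwise_pvFz _)) (pairwise_pvFz _)
      intro x
      rw [PySem.Set.mem_diff, mem_pvFz, mem_pvFz, mem_pvFz, hwmem]
      constructor
      · rintro ⟨h1 | h1, h2⟩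
        · exact absurd h1 h2
        · exact h1
      · intro h
        exact ⟨Or.inr h, hdisj' x h⟩
    have htne : ¬ (PySem.Set.diff (pvFz w) (pvFz p1) = pvFz p1) := by
      rw [hdiffb]
      intro hc
      exact pre1 p2 hb p1 ha (Ne.symm hne) hc
    rw [if_neg htne, hdiffb]
    have hgb : canon.get? (pvFz p2) = some v2 := by
      apply PySem.Dict.get?_of_mem_items canon _ hcnd
      rw [hitems, hcl]; exact List.mem_map.mpr ⟨(p2, v2), hv2, rfl⟩
    rw [hgb]
    rw [hvw', hv1', hv2'] at hlt
    simp [hlt]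
  rw [hA, hB]

-- ===== VERDICT (by name: the statement is the Claim_ definition above) =====
theorem gameIsSuperadditive_spec : Claim_equal_gameIsSuperadditive := by
  intro values _hDom hPre
  unfold Spec_gameIsSuperadditive
  rcases hPre with h | ⟨h1, h2⟩ | ⟨h1, j, hj, i, hij, hviol, _⟩
  · refine main_eq_of_nodisj values ?_
    intro k1 hk1 k2 hk2 hne
    simpa [pvDisj, decide_eq_false_iff_not] using h k1 hk1 k2 hk2 hne
  · refine main_eq_of_pre12 values h1 ?_
    intro k1 hk1 k2 hk2 hne hd
    exact h2 k1 hk1 k2 hk2 hne (by simp [pvDisj, hd])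
  · exact main_eq_of_viol values h1 i j hj hij hviol
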